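-- pv_equiv track=rewrite | github.com/zvish123/RL_CNN_COURSE | presentations/ceryptograpy/secret_cipher.py | create_key_from_password
-- ===== SOURCE A (Python) =====
-- def create_key_from_password(password):
--     """
--     המרת סיסמה טקסטואלית למפתח מספרי
--
--     Args:
--         password (str): סיסמה טקסטואלית
--
--     Returns:
--         list: רשימת אינדקסים המייצגת את סדר העמודות
--
--     Example:
--         >>> create_key_from_password("ZEBRA")
--         [4, 1, 0, 3, 2]
--     """
--     if not password:
--         raise ValueError("Password cannot be empty")
--
--     if not password.replace(" ", "").isalnum():
--         raise ValueError("Password must contain only alphanumeric characters")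
--
--     # יצירת רשימת טאפלים: (index, char)
--     indexed_chars = list(enumerate(password))
--
--     # מיון לפי התו, שמירת האינדקס המקורי
--     sorted_chars = sorted(indexed_chars, key=lambda x: x[1])
--
--     # יצירת רשימת המפתח - סדר הקריאה של העמודות
--     key_order = [original_index for original_index, char in sorted_chars]
--
--     return key_order
-- ===== SOURCE B (Python) =====
-- def create_key_from_password(password):
--     if not password:
--         raise ValueError("Password cannot be empty")
--
--     if not password.replace(" ", "").isalnum():
--         raise ValueError("Password must contain only alphanumeric characters")
--
--     # Distribution (bucket) sort: allocate one bucket per character ordinal up to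
--     # the largest ordinal present, append each original index to its character's
--     # bucket in a single scan (stable by append order), then concatenate the
--     # buckets in ascending ordinal order. No call to sorted().
--     buckets = [[] for _ in range(max(map(ord, password)) + 1)]
--     for index, char in enumerate(password):
--         buckets[ord(char)].append(index)
--     return [index for bucket in buckets for index in bucket]
-- ===== Notes on version B (the rewrite author's own statement) =====
-- stated objective: alternative
-- what changed: Replaces sorted() over (index, char) pairs with a comparison-free bucket sort: one pass appends each original index to the bucket of its character ordinal (buckets sized by the largest ordinal present), then the buckets are concatenated in ascending ordinal order (stability by append order).
import Mathlib
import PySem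

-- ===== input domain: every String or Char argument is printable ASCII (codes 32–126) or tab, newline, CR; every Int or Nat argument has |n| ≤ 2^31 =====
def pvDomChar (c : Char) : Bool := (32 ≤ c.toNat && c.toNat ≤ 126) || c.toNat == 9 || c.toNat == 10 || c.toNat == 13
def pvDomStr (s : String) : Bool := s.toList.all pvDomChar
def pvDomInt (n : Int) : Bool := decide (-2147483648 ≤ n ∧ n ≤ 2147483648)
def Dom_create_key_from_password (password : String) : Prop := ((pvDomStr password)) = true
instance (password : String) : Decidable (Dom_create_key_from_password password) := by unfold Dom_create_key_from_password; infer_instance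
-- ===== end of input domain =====

-- B replaces sorted() with a single-pass bucket (distribution) sort over character
-- ordinals (buckets sized by the largest ordinal present). Return values only; no side effects.

-- ===== PORT A =====
-- The two ValueError guards raise exactly outside Pre_ below; the port transcribes
-- the post-guard computation: enumerate, sort by the character, extract the indices.
def create_key_from_password (password : String) : List Int :=
  (PySem.List.sorted (PySem.List.enumerate password.toList 0) (fun x => x.2) false).map
    (fun x => x.1)

-- ===== PORT B =====
-- Source B: buckets = [[] for _ in range(max(map(ord, password)) + 1)];
-- for index, char in enumerate(password): buckets[ord(char)].append(index);
-- return [index for bucket in buckets for index in bucket]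
-- (List.modify is exact here: every ord(char) < max+1, so the index is in range;
-- Python's max over the nonempty password is the foldl max below.)
def create_key_from_password_alt (password : String) : List Int :=
  let m := (password.toList.map Char.toNat).foldl max 0 + 1
  ((PySem.List.enumerate password.toList 0).foldl
      (fun (bs : List (List Int)) p => bs.modify p.2.toNat (fun b => b ++ [p.1]))
      (List.replicate m [])).flatten

-- ===== PRECONDITION & SPEC =====
-- Pre_ excludes exactly the two ValueError raises of A (empty password; some
-- non-alphanumeric character besides space, including the all-spaces password).
def Pre_create_key_from_password (password : String) : Prop :=
  password.toList ≠ [] ∧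
  (PySem.Str.replace password " " "").toList ≠ [] ∧
  ((PySem.Str.replace password " " "").toList.all PySem.Chars.isalnum) = true
instance (password : String) : Decidable (Pre_create_key_from_password password) := by
  unfold Pre_create_key_from_password; infer_instance

def pvWitness_create_key_from_password : String := "ZEBRA"

def Spec_create_key_from_password (password : String) (out : List Int) : Prop := out = create_key_from_password_alt password
instance (password : String) (out : List Int) : Decidable (Spec_create_key_from_password password out) := by unfold Spec_create_key_from_password; infer_instance

-- ===== CLAIM (what is proved, stated in full; the proofs are below) =====
def Claim_equal_create_key_from_password : Prop := ∀ (password : String), Dom_create_key_from_password password → Pre_create_key_from_password password → Spec_create_key_from_password password (create_key_from_password password)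

-- ===== LEMMAS AND PROOFS =====

-- Strict ordering used by Python's stable sort on (index, char) pairs drawn from
-- enumerate: by character, ties broken by the (strictly increasing) original index.
def pvLex (p q : Int × Char) : Prop := p.2 < q.2 ∨ (p.2 = q.2 ∧ p.1 ≤ q.1)

theorem char_lt_iff (c d : Char) : c < d ↔ c.toNat < d.toNat := by
  rw [Char.lt_def, UInt32.lt_iff_toNat_lt]; rfl

theorem char_eq_of_toNat {c d : Char} (h : c.toNat = d.toNat) : c = d := by
  apply Char.ext; exact UInt32.toNat_inj.mp h

theorem pvLex_le_snd {p q : Int × Char} (h : pvLex p q) : p.2 ≤ q.2 := by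
  rcases h with h | ⟨h, _⟩
  · exact le_of_lt h
  · exact le_of_eq h

-- Inserting an element whose index exceeds every index in a pvLex-sorted
-- accumulator (insertion-sort step of PySem.List.sorted) keeps it pvLex-sorted.
theorem insertBy_pairwise (x : Int × Char) (acc : List (Int × Char))
    (hp : acc.Pairwise pvLex) (hidx : ∀ p ∈ acc, p.1 < x.1) :
    (PySem.List.insertBy (fun a b => decide (a.2 < b.2)) x acc).Pairwise pvLex := by
  induction acc with
  | nil => simp [PySem.List.insertBy, pvLex]
  | cons y t ih =>
    have hstep : PySem.List.insertBy (fun a b => decide (a.2 < b.2)) x (y :: t) =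
        if x.2 < y.2 then x :: y :: t
        else y :: PySem.List.insertBy (fun a b => decide (a.2 < b.2)) x t := by
      simp [PySem.List.insertBy]
    rw [hstep]
    rcases List.pairwise_cons.mp hp with ⟨hy, ht⟩
    split_ifs with hlt
    · refine List.pairwise_cons.mpr ⟨?_, hp⟩
      intro z hz
      rcases List.mem_cons.mp hz with hzy | hzt
      · subst hzy; exact Or.inl hlt
      · exact Or.inl (lt_of_lt_of_le hlt (pvLex_le_snd (hy z hzt)))
    · refine List.pairwise_cons.mpr ⟨?_, ?_⟩
      · intro z hz
        rcases (PySem.List.mem_insertBy _ x z t).mp hz with hzx | hzt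
        · rw [hzx]
          have hle : y.2 ≤ x.2 := le_of_not_gt hlt
          rcases lt_or_eq_of_le hle with h | h
          · exact Or.inl h
          · exact Or.inr ⟨h, le_of_lt (hidx y (List.mem_cons_self))⟩
        · exact hy z hzt
      · exact ih ht (fun p hpmem => hidx p (List.mem_cons_of_mem _ hpmem))

theorem foldl_insertBy_pairwise (l : List (Int × Char)) :
    ∀ (acc : List (Int × Char)), acc.Pairwise pvLex →
      (∀ p ∈ acc, ∀ q ∈ l, p.1 < q.1) → l.Pairwise (fun p q => p.1 < q.1) →
      (l.foldl (fun acc x => PySem.List.insertBy (fun a b => decide (a.2 < b.2)) x acc) acc).Pairwise pvLex := by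
  induction l with
  | nil => intro acc hp _ _; simpa using hp
  | cons x l ih =>
    intro acc hp hcross hl
    rcases List.pairwise_cons.mp hl with ⟨hx, hl'⟩
    simp only [List.foldl_cons]
    apply ih
    · exact insertBy_pairwise x acc hp (fun p hpm => hcross p hpm x List.mem_cons_self)
    · intro p hpm q hq
      rcases (PySem.List.mem_insertBy _ x p acc).mp hpm with hpx | hpa
      · subst hpx; exact hx q hq
      · exact hcross p hpa q (List.mem_cons_of_mem _ hq)
    · exact hl'

-- Python's stable sort of a list with strictly increasing indices is pvLex-sorted.
theorem stable_sorted_pairwise (l : List (Int × Char))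
    (h : l.Pairwise (fun p q => p.1 < q.1)) :
    (PySem.List.sorted l (fun x => x.2) false).Pairwise pvLex := by
  rw [PySem.List.sorted_eq_foldl_insertBy]
  exact foldl_insertBy_pairwise l [] (List.Pairwise.nil) (by simp) h

-- The concatenation of the per-ordinal buckets, as a list of pairs.
def bucketed (l : List (Int × Char)) (n : Nat) : List (Int × Char) :=
  (List.range n).flatMap (fun c => l.filter (fun p => p.2.toNat == c))

theorem bucketed_perm (n : Nat) : ∀ (l : List (Int × Char)),
    (∀ p ∈ l, p.2.toNat < n) → (bucketed l n).Perm l := by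
  induction n with
  | zero =>
    intro l h
    have hl : l = [] := by
      cases l with
      | nil => rfl
      | cons a t => exact absurd (h a List.mem_cons_self) (by omega)
    subst hl; simp [bucketed]
  | succ n ih =>
    intro l h
    have key : bucketed l (n + 1) =
        bucketed (l.filter (fun p => !(p.2.toNat == n))) n ++
          l.filter (fun p => p.2.toNat == n) := by
      rw [bucketed, List.range_succ, List.flatMap_append]
      congr 1
      · apply List.flatMap_congr
        intro c hc
        have hcn : c < n := List.mem_range.mp hc
        rw [List.filter_filter]
        apply (List.filter_congr ?_).symm
        intro p _
        by_cases hpc : p.2.toNat = c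
        · simp [hpc]; omega
        · simp [hpc]
      · simp
    rw [key]
    have h1 : (bucketed (l.filter (fun p => !(p.2.toNat == n))) n).Perm
        (l.filter (fun p => !(p.2.toNat == n))) := by
      apply ih
      intro p hpm
      rcases List.mem_filter.mp hpm with ⟨hpl, hpn⟩
      have := h p hpl
      simp only [Bool.not_eq_eq_eq_not, Bool.not_true, beq_eq_false_iff_ne, ne_eq] at hpn
      omega
    have h2 := h1.append_right (l.filter (fun p => p.2.toNat == n))
    exact h2.trans ((List.perm_append_comm).trans
      (List.filter_append_perm (fun p => p.2.toNat == n) l))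

theorem bucketed_pairwise (n : Nat) (l : List (Int × Char))
    (h : l.Pairwise (fun p q => p.1 < q.1)) : (bucketed l n).Pairwise pvLex := by
  induction n with
  | zero => simp [bucketed]
  | succ n ih =>
    rw [bucketed, List.range_succ, List.flatMap_append]
    apply List.pairwise_append.mpr
    refine ⟨by simpa [bucketed] using ih, ?_, ?_⟩
    · simp only [List.flatMap_cons, List.flatMap_nil, List.append_nil]
      apply (List.Pairwise.filter _ h).imp_of_mem
      intro a b ha hb hab
      have ha' : a.2.toNat = n := by
        have := (List.mem_filter.mp ha).2; simpa using this
      have hb' : b.2.toNat = n := by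
        have := (List.mem_filter.mp hb).2; simpa using this
      exact Or.inr ⟨char_eq_of_toNat (ha'.trans hb'.symm), le_of_lt hab⟩
    · intro a ha b hb
      simp only [List.flatMap_cons, List.flatMap_nil, List.append_nil] at hb
      rcases List.mem_flatMap.mp ha with ⟨c, hc, hac⟩
      have hcn : c < n := List.mem_range.mp hc
      have ha' : a.2.toNat = c := by
        have := (List.mem_filter.mp hac).2; simpa using this
      have hb' : b.2.toNat = n := by
        have := (List.mem_filter.mp hb).2; simpa using this
      exact Or.inl ((char_lt_iff _ _).mpr (by omega))

-- A's sorted() equals the bucket concatenation (uniqueness of the pvLex-sorted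
-- rearrangement: pvLex is antisymmetric).
theorem sorted_eq_bucketed (n : Nat) (l : List (Int × Char))
    (hidx : l.Pairwise (fun p q => p.1 < q.1)) (hc : ∀ p ∈ l, p.2.toNat < n) :
    PySem.List.sorted l (fun x => x.2) false = bucketed l n := by
  apply List.Perm.eq_of_pairwise (le := pvLex)
  · intro a b _ _ hab hba
    rcases hab with h1 | ⟨h1, h1'⟩
    · rcases hba with h2 | ⟨h2, _⟩
      · exact absurd h2 (not_lt_of_gt h1)
      · exact absurd h1 (by rw [h2]; exact lt_irrefl _)
    · rcases hba with h2 | ⟨h2, h2'⟩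
      · exact absurd h2 (by rw [h1]; exact lt_irrefl _)
      · exact Prod.ext (le_antisymm h1' h2') h1
  · exact stable_sorted_pairwise l hidx
  · exact bucketed_pairwise n l hidx
  · exact (PySem.List.sorted_perm l _ _).trans (bucketed_perm n l hc).symm

-- The bucket-filling fold of B, characterised bucket by bucket.
theorem foldl_modify_length (l : List (Int × Char)) :
    ∀ (bs : List (List Int)),
      (l.foldl (fun bs p => bs.modify p.2.toNat (fun b => b ++ [p.1])) bs).length = bs.length := by
  induction l with
  | nil => intro bs; rfl
  | cons x l ih => intro bs; simp [List.foldl_cons, ih, List.length_modify]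

theorem foldl_modify_getElem? (n : Nat) (l : List (Int × Char)) (hc : ∀ p ∈ l, p.2.toNat < n) :
    ∀ (bs : List (List Int)), bs.length = n → ∀ (c : Nat),
      (l.foldl (fun bs p => bs.modify p.2.toNat (fun b => b ++ [p.1])) bs)[c]? =
        bs[c]?.map (· ++ (l.filter (fun p => p.2.toNat == c)).map (fun p => p.1)) := by
  induction l with
  | nil =>
    intro bs _ c
    simp only [List.foldl_nil, List.filter_nil, List.map_nil, List.append_nil]
    cases bs[c]? <;> simp
  | cons x l ih =>
    intro bs hlen c
    have hx : x.2.toNat < n := hc x List.mem_cons_self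
    have hc' : ∀ p ∈ l, p.2.toNat < n := fun p hp => hc p (List.mem_cons_of_mem _ hp)
    simp only [List.foldl_cons]
    rw [ih hc' _ (by rw [List.length_modify]; exact hlen) c]
    rw [List.getElem?_modify]
    by_cases hxc : x.2.toNat = c
    · have : (x.2.toNat == c) = true := by simpa using hxc
      simp only [List.filter_cons, this, if_pos hxc]
      cases bs[c]? <;> simp
    · have : (x.2.toNat == c) = true ↔ False := by simpa using hxc
      simp only [List.filter_cons]
      rw [if_neg (by simpa using hxc)]
      simp only [hxc, if_false]
      cases bs[c]? <;> simp

-- B's fold-and-flatten equals the indices of the bucket concatenation.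
theorem alt_eq_bucketed_map (n : Nat) (l : List (Int × Char)) (hc : ∀ p ∈ l, p.2.toNat < n) :
    (l.foldl (fun bs p => bs.modify p.2.toNat (fun b => b ++ [p.1]))
        (List.replicate n [])).flatten =
      (bucketed l n).map (fun p => p.1) := by
  set bsF := l.foldl (fun bs p => bs.modify p.2.toNat (fun b => b ++ [p.1]))
      (List.replicate n ([] : List Int)) with hbsF
  have hlen : bsF.length = n := by
    rw [hbsF, foldl_modify_length]; simp
  have hget : ∀ c : Nat, c < n →
      bsF[c]? = some ((l.filter (fun p => p.2.toNat == c)).map (fun p => p.1)) := by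
    intro c hcn
    rw [hbsF, foldl_modify_getElem? n l hc _ (by simp) c]
    rw [List.getElem?_replicate, if_pos hcn]
    simp
  have hbs : bsF = (List.range n).map
      (fun c => (l.filter (fun p => p.2.toNat == c)).map (fun p => p.1)) := by
    apply List.ext_getElem
    · simp [hlen]
    · intro i h1 h2
      have hi : i < n := by omega
      have := hget i hi
      rw [List.getElem?_eq_getElem h1] at this
      have hval := Option.some_injective _ this
      rw [hval]
      simp
  rw [hbs, bucketed, List.map_flatMap]
  rw [List.flatMap_def]

-- Every element of a list is at most the foldl-max of the list.
theorem init_le_foldl_max (xs : List Nat) : ∀ (a : Nat), a ≤ xs.foldl max a := by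
  induction xs with
  | nil => intro a; simp
  | cons y t ih =>
    intro a
    simp only [List.foldl_cons]
    exact le_trans (le_max_left a y) (ih (max a y))

theorem le_foldl_max (xs : List Nat) : ∀ (a : Nat) (x : Nat), x ∈ xs → x ≤ xs.foldl max a := by
  induction xs with
  | nil => intro a x hx; cases hx
  | cons y t ih =>
    intro a x hx
    simp only [List.foldl_cons]
    rcases List.mem_cons.mp hx with hxy | hxt
    · subst hxy; exact le_trans (le_max_right a x) (init_le_foldl_max t (max a x))
    · exact ih _ x hxt

-- ===== VERDICT (by name: the statement is the Claim_ definition above) =====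
theorem create_key_from_password_spec : Claim_equal_create_key_from_password := by
  intro password hdom _
  unfold Spec_create_key_from_password create_key_from_password create_key_from_password_alt
  set l := PySem.List.enumerate password.toList 0 with hl
  set m := (password.toList.map Char.toNat).foldl max 0 + 1 with hm
  have hidx : l.Pairwise (fun p q => p.1 < q.1) := PySem.List.pairwise_lt_enumerate _ _
  have hc : ∀ p ∈ l, p.2.toNat < m := by
    intro p hp
    rcases (PySem.List.mem_enumerate_iff _ _ p).mp hp with ⟨k, hk, hpk⟩
    have hmem : p.2 ∈ password.toList := by rw [hpk]; exact List.getElem_mem hk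
    have hle : p.2.toNat ≤ (password.toList.map Char.toNat).foldl max 0 :=
      le_foldl_max _ 0 _ (List.mem_map_of_mem hmem)
    omega
  rw [sorted_eq_bucketed m l hidx hc, alt_eq_bucketed_map m l hc]
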